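-- pv_equiv track=rewrite | github.com/SashwatAnagolum/Elivagar | elivagar/circuits/human_design.py | convert_human_design_circ_to_gate_circ
-- ===== SOURCE A (Python) =====
-- def get_iqp_embedding_layer(num_qubits, enc_layer_num, circ_gates, gate_params, inputs_bounds, weights_bounds):
--     """
--     Get the gates in an IPQ embedding layer.
--     """
--     num_iqp_rzz_gates = (num_qubits * (num_qubits - 1)) // 2
--
--     circ_gates += ['h' for i in range(num_qubits)]
--     gate_params += [[i] for i in range(num_qubits)]
--     inputs_bounds += [inputs_bounds[-1] for i in range(num_qubits)]
--     weights_bounds += [weights_bounds[-1] for i in range(num_qubits)]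
--
--     circ_gates += ['rz' for i in range(num_qubits)]
--     gate_params += [[i] for i in range(num_qubits)]
--     inputs_bounds += [inputs_bounds[-1] + i + 1 for i in range(num_qubits)]
--     weights_bounds += [weights_bounds[-1] for i in range(num_qubits)]
--
--     circ_gates += ['rzz' for i in range(num_iqp_rzz_gates)]
--     gate_params += [[i, j] for i in range(num_qubits) for j in range(i + 1, num_qubits)]
--     inputs_bounds += [inputs_bounds[-1] + i + 1 for i in range(num_iqp_rzz_gates)]
--     weights_bounds += [weights_bounds[-1] for i in range(num_iqp_rzz_gates)]
--
-- def get_angle_embedding_layer(num_qubits, enc_layer_num, circ_gates, gate_params, inputs_bounds, weights_bounds):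
--     """
--     Get the gates in an angle embedding layer.
--     """
--     gate_used = 'ry' if (enc_layer_num % 2) == 1 else 'rx'
--
--     circ_gates += [gate_used for i in range(num_qubits)]
--     gate_params += [[i] for i in range(num_qubits)]
--     inputs_bounds += [inputs_bounds[-1] + i + 1 for i in range(num_qubits)]
--     weights_bounds += [weights_bounds[-1] for i in range(num_qubits)]
--
-- def get_amp_encoding_layer(num_qubits, enc_layer_num, circ_gates, gate_params, inputs_bounds, weights_bounds):
--     """
--     Get an amplitude encoding layer. WARNING: only use as the first gate / thing in a circuit.
--     """
--     circ_gates += ['amp_enc']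
--     gate_params += [[0]]
--     inputs_bounds += [2 ** num_qubits]
--     weights_bounds += [0]
--
-- def get_basic_var_layer(num_qubits, var_layer_num, circ_gates, gate_params, inputs_bounds, weights_bounds):
--     """
--     Get the gates in an angle embedding layer.
--     """
--     gate_used = 'ry' if (var_layer_num % 2) == 1 else 'rx'
--
--     circ_gates += [gate_used for i in range(num_qubits)]
--     gate_params += [[i] for i in range(num_qubits)]
--     inputs_bounds += [inputs_bounds[-1] for i in range(num_qubits)]
--     weights_bounds += [weights_bounds[-1] + i + 1 for i in range(num_qubits)]  \
--
--     circ_gates += ['cx' for i in range(num_qubits)]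
--     gate_params += [[i, (i + 1) % num_qubits] for i in range(num_qubits)]
--     inputs_bounds += [inputs_bounds[-1] for i in range(num_qubits)]
--     weights_bounds += [weights_bounds[-1] for i in range(num_qubits)]
--
-- def convert_human_design_circ_to_gate_circ(num_qubits, enc_layer, var_layer, num_enc_layers, num_var_layers):
--     """
--     Convert a human-designed circuit using layer templates from pennylane into a gate-based circuit. Currently only supports:
--         BasicEntangler layers with alternating Ry and Rx rotations.
--         IQPEmbedding layers with 1 repetition and the default pattern.
--         AngleEmbedding layers using X and Y rotations.
--     """
--     circ_gates = []
--     gate_params = []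
--     inputs_bounds = [0]
--     weights_bounds = [0]
--
--     layer_dict = {
--         'angle': get_angle_embedding_layer,
--         'iqp': get_iqp_embedding_layer,
--         'basic': get_basic_var_layer,
--         'amp': get_amp_encoding_layer}
--
--     for i in range(num_enc_layers):
--         layer_dict[enc_layer](num_qubits, i, circ_gates, gate_params, inputs_bounds, weights_bounds)
--
--     for i in range(num_var_layers):
--         layer_dict[var_layer](num_qubits, i, circ_gates, gate_params, inputs_bounds, weights_bounds)
--
--     return circ_gates, gate_params, inputs_bounds, weights_bounds
-- ===== SOURCE B (Python) =====
-- def convert_human_design_circ_to_gate_circ(num_qubits, enc_layer, var_layer, num_enc_layers, num_var_layers):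
--     """
--     Staged rebuild: phase 1 materializes the whole circuit as one flat stream of
--     per-gate records (gate, params, input_op, weight_op), where an op is ('add', d)
--     or ('set', v); phase 2 derives the four outputs by projection and a generic
--     left scan of the ops starting from [0].
--     """
--     def layer_records(kind, layer_num):
--         n = num_qubits
--         if kind == 'angle':
--             rot = 'ry' if layer_num % 2 == 1 else 'rx'
--             return [(rot, [i], ('add', 1), ('add', 0)) for i in range(n)]
--         if kind == 'iqp':
--             recs = [('h', [i], ('add', 0), ('add', 0)) for i in range(n)]
--             recs += [('rz', [i], ('add', 1), ('add', 0)) for i in range(n)]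
--             recs += [('rzz', [i, j], ('add', 1), ('add', 0))
--                      for i in range(n) for j in range(i + 1, n)]
--             return recs
--         if kind == 'basic':
--             rot = 'ry' if layer_num % 2 == 1 else 'rx'
--             return ([(rot, [i], ('add', 0), ('add', 1)) for i in range(n)]
--                     + [('cx', [i, (i + 1) % n], ('add', 0), ('add', 0)) for i in range(n)])
--         if kind == 'amp':
--             return [('amp_enc', [0], ('set', 2 ** n), ('set', 0))]
--         raise KeyError(kind)
--
--     records = []
--     for i in range(num_enc_layers):
--         records += layer_records(enc_layer, i)
--     for i in range(num_var_layers):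
--         records += layer_records(var_layer, i)
--
--     def scan(ops):
--         out = [0]
--         for op, v in ops:
--             out.append(v if op == 'set' else out[-1] + v)
--         return out
--
--     circ_gates = [r[0] for r in records]
--     gate_params = [r[1] for r in records]
--     inputs_bounds = scan(r[2] for r in records)
--     weights_bounds = scan(r[3] for r in records)
--     return circ_gates, gate_params, inputs_bounds, weights_bounds
-- ===== Notes on version B (the rewrite author's own statement) =====
-- stated objective: alternative
-- what changed: Replaces A's dict-dispatched helpers that mutate four parallel lists (re-reading inputs_bounds[-1]/weights_bounds[-1] inside each comprehension) by a two-stage pipeline: first materialize the circuit as one flat stream of per-gate records (gate, params, input-op, weight-op), then obtain the four outputs by projection and a single generic left scan of the add/set ops.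
-- intended difference: For negative num_qubits with an executed 'iqp' layer, A's pair count n*(n-1)//2 is positive while its pair list is empty, so A returns ghost 'rzz' gates with mismatched gate/param/bounds lists (e.g. (['rzz'], [], [0, 1], [0, 0])); B ties each 'rzz' to an actual qubit pair and returns empty layers, the intended value for an empty register. — e.g. on convert_human_design_circ_to_gate_circ(-1, "iqp", "basic", 1, 0): A returns (["rzz"], [], [0, 1], [0, 0]), B returns ([], [], [0], [0])
import Mathlib
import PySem

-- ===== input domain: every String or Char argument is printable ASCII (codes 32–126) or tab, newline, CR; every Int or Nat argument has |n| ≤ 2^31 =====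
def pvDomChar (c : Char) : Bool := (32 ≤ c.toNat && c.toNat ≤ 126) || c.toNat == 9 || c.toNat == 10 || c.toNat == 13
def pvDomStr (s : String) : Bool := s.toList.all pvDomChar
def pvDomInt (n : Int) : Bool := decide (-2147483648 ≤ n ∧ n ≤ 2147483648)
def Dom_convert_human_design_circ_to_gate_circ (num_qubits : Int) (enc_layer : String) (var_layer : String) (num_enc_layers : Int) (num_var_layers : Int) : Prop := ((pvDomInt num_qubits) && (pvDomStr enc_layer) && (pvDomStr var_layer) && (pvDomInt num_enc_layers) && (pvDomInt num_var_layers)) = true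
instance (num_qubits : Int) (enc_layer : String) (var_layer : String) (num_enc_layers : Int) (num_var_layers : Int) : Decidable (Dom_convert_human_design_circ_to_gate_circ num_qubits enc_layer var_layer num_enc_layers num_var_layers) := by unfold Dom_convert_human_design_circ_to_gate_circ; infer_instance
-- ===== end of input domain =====

-- B rebuilds the circuit as one flat stream of per-gate records (gate, params, input-op,
-- weight-op) and derives the four output lists by projection plus one generic left scan of
-- the add/set ops (objective: alternative decomposition, same cost); for negative
-- num_qubits with an 'iqp' layer B intentionally differs from A (see D_ below).

-- ===== PORT A =====
-- Python l[-1]; exact here: the bounds lists are seeded with [0] and only appended to.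
def pvLast (l : List Int) : Int := l.getLastD 0

def get_iqp_embedding_layer (num_qubits enc_layer_num : Int)
    (st : List String × List (List Int) × List Int × List Int) :
    List String × List (List Int) × List Int × List Int :=
  let (cg, gp, ib, wb) := st
  let num_iqp_rzz_gates := PySem.Int.floordiv (num_qubits * (num_qubits - 1)) 2
  let cg := cg ++ (PySem.List.pyRange 0 num_qubits 1).map (fun _ => "h")
  let gp := gp ++ (PySem.List.pyRange 0 num_qubits 1).map (fun i => [i])
  let ib := ib ++ (PySem.List.pyRange 0 num_qubits 1).map (fun _ => pvLast ib)
  let wb := wb ++ (PySem.List.pyRange 0 num_qubits 1).map (fun _ => pvLast wb)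
  let cg := cg ++ (PySem.List.pyRange 0 num_qubits 1).map (fun _ => "rz")
  let gp := gp ++ (PySem.List.pyRange 0 num_qubits 1).map (fun i => [i])
  let ib := ib ++ (PySem.List.pyRange 0 num_qubits 1).map (fun i => pvLast ib + i + 1)
  let wb := wb ++ (PySem.List.pyRange 0 num_qubits 1).map (fun _ => pvLast wb)
  let cg := cg ++ (PySem.List.pyRange 0 num_iqp_rzz_gates 1).map (fun _ => "rzz")
  let gp := gp ++ (PySem.List.pyRange 0 num_qubits 1).flatMap
      (fun i => (PySem.List.pyRange (i + 1) num_qubits 1).map (fun j => [i, j]))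
  let ib := ib ++ (PySem.List.pyRange 0 num_iqp_rzz_gates 1).map (fun i => pvLast ib + i + 1)
  let wb := wb ++ (PySem.List.pyRange 0 num_iqp_rzz_gates 1).map (fun _ => pvLast wb)
  (cg, gp, ib, wb)

def get_angle_embedding_layer (num_qubits enc_layer_num : Int)
    (st : List String × List (List Int) × List Int × List Int) :
    List String × List (List Int) × List Int × List Int :=
  let (cg, gp, ib, wb) := st
  let gate_used := if PySem.Int.mod enc_layer_num 2 = 1 then "ry" else "rx"
  let cg := cg ++ (PySem.List.pyRange 0 num_qubits 1).map (fun _ => gate_used)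
  let gp := gp ++ (PySem.List.pyRange 0 num_qubits 1).map (fun i => [i])
  let ib := ib ++ (PySem.List.pyRange 0 num_qubits 1).map (fun i => pvLast ib + i + 1)
  let wb := wb ++ (PySem.List.pyRange 0 num_qubits 1).map (fun _ => pvLast wb)
  (cg, gp, ib, wb)

-- Python's 2 ** num_qubits: exact for 0 ≤ num_qubits; a negative exponent yields a float
-- in Python (not an int), excluded by Pre_.
def get_amp_encoding_layer (num_qubits enc_layer_num : Int)
    (st : List String × List (List Int) × List Int × List Int) :
    List String × List (List Int) × List Int × List Int :=
  let (cg, gp, ib, wb) := st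
  (cg ++ ["amp_enc"], gp ++ [[0]], ib ++ [(2 : Int) ^ num_qubits.toNat], wb ++ [0])

def get_basic_var_layer (num_qubits var_layer_num : Int)
    (st : List String × List (List Int) × List Int × List Int) :
    List String × List (List Int) × List Int × List Int :=
  let (cg, gp, ib, wb) := st
  let gate_used := if PySem.Int.mod var_layer_num 2 = 1 then "ry" else "rx"
  let cg := cg ++ (PySem.List.pyRange 0 num_qubits 1).map (fun _ => gate_used)
  let gp := gp ++ (PySem.List.pyRange 0 num_qubits 1).map (fun i => [i])
  let ib := ib ++ (PySem.List.pyRange 0 num_qubits 1).map (fun _ => pvLast ib)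
  let wb := wb ++ (PySem.List.pyRange 0 num_qubits 1).map (fun i => pvLast wb + i + 1)
  let cg := cg ++ (PySem.List.pyRange 0 num_qubits 1).map (fun _ => "cx")
  let gp := gp ++ (PySem.List.pyRange 0 num_qubits 1).map (fun i => [i, PySem.Int.mod (i + 1) num_qubits])
  let ib := ib ++ (PySem.List.pyRange 0 num_qubits 1).map (fun _ => pvLast ib)
  let wb := wb ++ (PySem.List.pyRange 0 num_qubits 1).map (fun _ => pvLast wb)
  (cg, gp, ib, wb)

-- layer_dict[name]: first-match dispatch on the dict's keys; an unknown key is a Python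
-- KeyError (excluded by Pre_), modelled as the identity.
def pvLayerDictA (name : String) (num_qubits i : Int)
    (st : List String × List (List Int) × List Int × List Int) :
    List String × List (List Int) × List Int × List Int :=
  if name = "angle" then get_angle_embedding_layer num_qubits i st
  else if name = "iqp" then get_iqp_embedding_layer num_qubits i st
  else if name = "basic" then get_basic_var_layer num_qubits i st
  else if name = "amp" then get_amp_encoding_layer num_qubits i st
  else st

def convert_human_design_circ_to_gate_circ (num_qubits : Int) (enc_layer : String) (var_layer : String) (num_enc_layers : Int) (num_var_layers : Int) : List String × List (List Int) × List Int × List Int :=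
  let st : List String × List (List Int) × List Int × List Int := ([], [], [0], [0])
  let st := (PySem.List.pyRange 0 num_enc_layers 1).foldl
      (fun st i => pvLayerDictA enc_layer num_qubits i st) st
  let st := (PySem.List.pyRange 0 num_var_layers 1).foldl
      (fun st i => pvLayerDictA var_layer num_qubits i st) st
  st

-- ===== PORT B =====
-- an op is ("add", d) or ("set", v); a record is (gate, params, input_op, weight_op)
def pvScanStep (out : List Int) (p : String × Int) : List Int :=
  out ++ [if p.1 = "set" then p.2 else out.getLastD 0 + p.2]

-- Source B's scan: left scan of the ops starting from [0]
def pvScan (ops : List (String × Int)) : List Int := ops.foldl pvScanStep [0]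

def pvLayerRecords (num_qubits : Int) (kind : String) (layer_num : Int) :
    List (String × List Int × (String × Int) × (String × Int)) :=
  if kind = "angle" then
    let rot := if PySem.Int.mod layer_num 2 = 1 then "ry" else "rx"
    (PySem.List.pyRange 0 num_qubits 1).map (fun i => (rot, [i], ("add", 1), ("add", 0)))
  else if kind = "iqp" then
    let recs := (PySem.List.pyRange 0 num_qubits 1).map
      (fun i => ("h", [i], (("add", 0) : String × Int), (("add", 0) : String × Int)))
    let recs := recs ++ (PySem.List.pyRange 0 num_qubits 1).map
      (fun i => ("rz", [i], ("add", 1), ("add", 0)))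
    recs ++ (PySem.List.pyRange 0 num_qubits 1).flatMap
      (fun i => (PySem.List.pyRange (i + 1) num_qubits 1).map
        (fun j => ("rzz", [i, j], ("add", 1), ("add", 0))))
  else if kind = "basic" then
    let rot := if PySem.Int.mod layer_num 2 = 1 then "ry" else "rx"
    (PySem.List.pyRange 0 num_qubits 1).map (fun i => (rot, [i], ("add", 0), ("add", 1)))
    ++ (PySem.List.pyRange 0 num_qubits 1).map
      (fun i => ("cx", [i, PySem.Int.mod (i + 1) num_qubits], ("add", 0), ("add", 0)))
  else if kind = "amp" then
    [("amp_enc", [0], ("set", (2 : Int) ^ num_qubits.toNat), ("set", 0))]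
  else []  -- raise KeyError(kind) in Python; excluded by Pre_

def convert_human_design_circ_to_gate_circ_alt (num_qubits : Int) (enc_layer : String) (var_layer : String) (num_enc_layers : Int) (num_var_layers : Int) : List String × List (List Int) × List Int × List Int :=
  let recs : List (String × List Int × (String × Int) × (String × Int)) :=
    (PySem.List.pyRange 0 num_enc_layers 1).foldl
      (fun r i => r ++ pvLayerRecords num_qubits enc_layer i) []
  let recs := (PySem.List.pyRange 0 num_var_layers 1).foldl
      (fun r i => r ++ pvLayerRecords num_qubits var_layer i) recs
  (recs.map (fun r => r.1), recs.map (fun r => r.2.1),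
   pvScan (recs.map (fun r => r.2.2.1)), pvScan (recs.map (fun r => r.2.2.2)))

-- ===== PRECONDITION & SPEC =====
-- Pre_ excludes (a) unknown layer names on an executed loop (Python KeyError) and
-- (b) an 'amp' layer with negative num_qubits, where Python's 2**num_qubits is a float,
-- not a value of the declared int type.
def Pre_convert_human_design_circ_to_gate_circ (num_qubits : Int) (enc_layer : String) (var_layer : String) (num_enc_layers : Int) (num_var_layers : Int) : Prop :=
  (num_enc_layers ≤ 0 ∨ enc_layer = "angle" ∨ enc_layer = "iqp" ∨ enc_layer = "basic" ∨ enc_layer = "amp") ∧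
  (num_var_layers ≤ 0 ∨ var_layer = "angle" ∨ var_layer = "iqp" ∨ var_layer = "basic" ∨ var_layer = "amp") ∧
  (0 ≤ num_qubits ∨ ¬ ((0 < num_enc_layers ∧ enc_layer = "amp") ∨ (0 < num_var_layers ∧ var_layer = "amp")))
instance (num_qubits : Int) (enc_layer : String) (var_layer : String) (num_enc_layers : Int) (num_var_layers : Int) : Decidable (Pre_convert_human_design_circ_to_gate_circ num_qubits enc_layer var_layer num_enc_layers num_var_layers) := by unfold Pre_convert_human_design_circ_to_gate_circ; infer_instance

def pvWitness_convert_human_design_circ_to_gate_circ : Int × String × String × Int × Int := (2, "iqp", "basic", 1, 1)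

-- For negative num_qubits with an executed 'iqp' layer, A's pair count n*(n-1)//2 is
-- positive while its pair list is empty, so A returns ghost 'rzz' gates with mismatched
-- gate/param/bounds lists; B ties each 'rzz' to an actual qubit pair and returns empty
-- layers, the intended value for an empty register.
def D_convert_human_design_circ_to_gate_circ (num_qubits : Int) (enc_layer : String) (var_layer : String) (num_enc_layers : Int) (num_var_layers : Int) : Prop :=
  num_qubits < 0 ∧ ((0 < num_enc_layers ∧ enc_layer = "iqp") ∨ (0 < num_var_layers ∧ var_layer = "iqp"))
instance (num_qubits : Int) (enc_layer : String) (var_layer : String) (num_enc_layers : Int) (num_var_layers : Int) : Decidable (D_convert_human_design_circ_to_gate_circ num_qubits enc_layer var_layer num_enc_layers num_var_layers) := by unfold D_convert_human_design_circ_to_gate_circ; infer_instance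

def Spec_convert_human_design_circ_to_gate_circ (num_qubits : Int) (enc_layer : String) (var_layer : String) (num_enc_layers : Int) (num_var_layers : Int) (out : List String × List (List Int) × List Int × List Int) : Prop := ¬ D_convert_human_design_circ_to_gate_circ num_qubits enc_layer var_layer num_enc_layers num_var_layers → out = convert_human_design_circ_to_gate_circ_alt num_qubits enc_layer var_layer num_enc_layers num_var_layers
instance (num_qubits : Int) (enc_layer : String) (var_layer : String) (num_enc_layers : Int) (num_var_layers : Int) (out : List String × List (List Int) × List Int × List Int) : Decidable (Spec_convert_human_design_circ_to_gate_circ num_qubits enc_layer var_layer num_enc_layers num_var_layers out) := by unfold Spec_convert_human_design_circ_to_gate_circ; infer_instance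

def pvDiffWitness_convert_human_design_circ_to_gate_circ : Int × String × String × Int × Int := (-1, "iqp", "basic", 1, 0)
def pvDiffWitnessOut_convert_human_design_circ_to_gate_circ : (List String × List (List Int) × List Int × List Int) × (List String × List (List Int) × List Int × List Int) :=
  ((["rzz"], [], [0, 1], [0, 0]), ([], [], [0], [0]))

-- ===== CLAIM (what is proved, stated in full; the proofs are below) =====
def Claim_unchanged_convert_human_design_circ_to_gate_circ : Prop := ∀ (num_qubits : Int) (enc_layer : String) (var_layer : String) (num_enc_layers : Int) (num_var_layers : Int), Dom_convert_human_design_circ_to_gate_circ num_qubits enc_layer var_layer num_enc_layers num_var_layers → Pre_convert_human_design_circ_to_gate_circ num_qubits enc_layer var_layer num_enc_layers num_var_layers → Spec_convert_human_design_circ_to_gate_circ num_qubits enc_layer var_layer num_enc_layers num_var_layers (convert_human_design_circ_to_gate_circ num_qubits enc_layer var_layer num_enc_layers num_var_layers)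
def Claim_changed_convert_human_design_circ_to_gate_circ : Prop := Dom_convert_human_design_circ_to_gate_circ (pvDiffWitness_convert_human_design_circ_to_gate_circ.1) (pvDiffWitness_convert_human_design_circ_to_gate_circ.2.1) (pvDiffWitness_convert_human_design_circ_to_gate_circ.2.2.1) (pvDiffWitness_convert_human_design_circ_to_gate_circ.2.2.2.1) (pvDiffWitness_convert_human_design_circ_to_gate_circ.2.2.2.2) ∧ Pre_convert_human_design_circ_to_gate_circ (pvDiffWitness_convert_human_design_circ_to_gate_circ.1) (pvDiffWitness_convert_human_design_circ_to_gate_circ.2.1) (pvDiffWitness_convert_human_design_circ_to_gate_circ.2.2.1) (pvDiffWitness_convert_human_design_circ_to_gate_circ.2.2.2.1) (pvDiffWitness_convert_human_design_circ_to_gate_circ.2.2.2.2) ∧ D_convert_human_design_circ_to_gate_circ (pvDiffWitness_convert_human_design_circ_to_gate_circ.1) (pvDiffWitness_convert_human_design_circ_to_gate_circ.2.1) (pvDiffWitness_convert_human_design_circ_to_gate_circ.2.2.1) (pvDiffWitness_convert_human_design_circ_to_gate_circ.2.2.2.1) (pvDiffWitness_convert_human_design_circ_to_gate_circ.2.2.2.2)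 ∧ convert_human_design_circ_to_gate_circ (pvDiffWitness_convert_human_design_circ_to_gate_circ.1) (pvDiffWitness_convert_human_design_circ_to_gate_circ.2.1) (pvDiffWitness_convert_human_design_circ_to_gate_circ.2.2.1) (pvDiffWitness_convert_human_design_circ_to_gate_circ.2.2.2.1) (pvDiffWitness_convert_human_design_circ_to_gate_circ.2.2.2.2) = pvDiffWitnessOut_convert_human_design_circ_to_gate_circ.1 ∧ convert_human_design_circ_to_gate_circ_alt (pvDiffWitness_convert_human_design_circ_to_gate_circ.1) (pvDiffWitness_convert_human_design_circ_to_gate_circ.2.1) (pvDiffWitness_convert_human_design_circ_to_gate_circ.2.2.1) (pvDiffWitness_convert_human_design_circ_to_gate_circ.2.2.2.1) (pvDiffWitness_convert_human_design_circ_to_gate_circ.2.2.2.2) = pvDiffWitnessOut_convert_human_design_circ_to_gate_circ.2 ∧ pvDiffWitnessOut_convert_human_design_circ_to_gate_circ.1 ≠ pvDiffWitnessOut_convert_human_design_circ_to_gate_circ.2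
def Claim_exact_convert_human_design_circ_to_gate_circ : Prop := ∀ (num_qubits : Int) (enc_layer : String) (var_layer : String) (num_enc_layers : Int) (num_var_layers : Int), Dom_convert_human_design_circ_to_gate_circ num_qubits enc_layer var_layer num_enc_layers num_var_layers → Pre_convert_human_design_circ_to_gate_circ num_qubits enc_layer var_layer num_enc_layers num_var_layers → D_convert_human_design_circ_to_gate_circ num_qubits enc_layer var_layer num_enc_layers num_var_layers → convert_human_design_circ_to_gate_circ num_qubits enc_layer var_layer num_enc_layers num_var_layers ≠ convert_human_design_circ_to_gate_circ_alt num_qubits enc_layer var_layer num_enc_layers num_var_layers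

-- ===== LEMMAS AND PROOFS =====

-- interpretation of B's record stream (proof-side coupling only)
def pvInterp (r : List (String × List Int × (String × Int) × (String × Int))) :
    List String × List (List Int) × List Int × List Int :=
  (r.map (fun x => x.1), r.map (fun x => x.2.1),
   pvScan (r.map (fun x => x.2.2.1)), pvScan (r.map (fun x => x.2.2.2)))

theorem pvScan_append (o1 o2 : List (String × Int)) :
    pvScan (o1 ++ o2) = o2.foldl pvScanStep (pvScan o1) := by
  simp [pvScan, List.foldl_append]

theorem pvScan_const_block {α : Type} (l : List α) (c : Int) (acc : List Int) :
    (l.map (fun _ => (("add" : String), c))).foldl pvScanStep acc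
    = acc ++ (List.range l.length).map (fun t : Nat => pvLast acc + c * ((t : Int) + 1)) := by
  induction l generalizing acc with
  | nil => simp
  | cons a l ih =>
    have step : pvScanStep acc ("add", c) = acc ++ [pvLast acc + c] := by
      simp [pvScanStep, pvLast]
    rw [List.map_cons, List.foldl_cons, step, ih]
    have hlast : pvLast (acc ++ [pvLast acc + c]) = pvLast acc + c := by simp [pvLast]
    rw [hlast]
    simp only [List.append_assoc, List.singleton_append, List.length_cons,
      List.range_succ_eq_map, List.map_cons, List.map_map]
    refine congrArg _ (List.cons_eq_cons.mpr ⟨by ring, List.map_congr_left fun t _ => by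
      simp only [Function.comp_apply]; push_cast; ring⟩)

-- A's two comprehension shapes, as range-maps
theorem pvRangeA_inc (nq base : Int) :
    (List.range (PySem.List.pyRange 0 nq 1).length).map (fun t : Nat => base + 1 * ((t : Int) + 1))
    = (PySem.List.pyRange 0 nq 1).map (fun i => base + i + 1) := by
  rw [PySem.List.pyRange_one]
  simp only [List.length_map, List.length_range, List.map_map]
  exact List.map_congr_left fun t _ => by simp [Function.comp]; ring

theorem pvRangeA_const (nq base : Int) :
    (List.range (PySem.List.pyRange 0 nq 1).length).map (fun t : Nat => base + 0 * ((t : Int) + 1))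
    = (PySem.List.pyRange 0 nq 1).map (fun _ => base) := by
  rw [PySem.List.pyRange_one]
  simp only [List.length_map, List.length_range, List.map_map]
  exact List.map_congr_left fun t _ => by simp [Function.comp]

-- length of the iqp pair list
theorem pvPairs_length {α : Type} (f : Int → Int → α) :
    ∀ (t : Nat) (a b : Int), (b - a).toNat = t →
    ((PySem.List.pyRange a b 1).flatMap
      (fun i => (PySem.List.pyRange (i + 1) b 1).map (f i))).length = t * (t - 1) / 2 := by
  intro t
  induction t with
  | zero =>
    intro a b h
    rw [PySem.List.pyRange_one_eq_nil (by omega)]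
    simp
  | succ s ih =>
    intro a b h
    rw [PySem.List.pyRange_one_cons (by omega)]
    rw [List.flatMap_cons, List.length_append, List.length_map,
      PySem.List.length_pyRange_one, ih (a + 1) b (by omega)]
    have hst : (b - (a + 1)).toNat = s := by omega
    rw [hst]
    cases s with
    | zero => simp
    | succ m =>
      obtain ⟨k, hk⟩ := Nat.even_mul_succ_self m
      have e1 : (m + 1) * (m + 1 - 1) = 2 * k := by
        rw [Nat.add_sub_cancel, Nat.mul_comm]; omega
      have e2 : (m + 1 + 1) * (m + 1 + 1 - 1) = 2 * (k + (m + 1)) := by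
        rw [Nat.add_sub_cancel, show (m + 1 + 1) * (m + 1) = m * (m + 1) + 2 * (m + 1) from by
          ring, hk]; ring
      rw [e1, e2, Nat.mul_div_cancel_left _ (by norm_num),
        Nat.mul_div_cancel_left _ (by norm_num)]
      omega

theorem pvNumPairs (b : Int) (hb : 0 ≤ b) :
    PySem.Int.floordiv (b * (b - 1)) 2 = ((b.toNat * (b.toNat - 1) / 2 : Nat) : Int) := by
  obtain ⟨n, rfl⟩ := Int.eq_ofNat_of_zero_le hb
  cases n with
  | zero => simp [PySem.Int.floordiv]
  | succ m =>
    have h1 : ((m + 1 : Nat) : Int) * (((m + 1 : Nat) : Int) - 1) = (((m + 1) * m : Nat) : Int) := by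
      push_cast; ring
    rw [h1]
    have := PySem.Int.floordiv_natCast ((m + 1) * m) 2
    rw [show ((2 : Nat) : Int) = (2 : Int) from rfl] at this
    rw [this]
    simp

-- coupling: one layer of B's record stream interprets to one A layer step
theorem pvFlatConst {α β : Type} (l : List Int) (g : Int → List Int) (f : Int → Int → α) (c : β) :
    l.flatMap (fun i => (g i).map (fun _ => c))
    = (l.flatMap (fun i => (g i).map (f i))).map (fun _ => c) := by
  simp [List.map_flatMap, List.map_map, Function.comp_def]


theorem pvScan_block_inc (nq : Int) (acc : List Int) :
    (List.map (fun _ => (("add" : String), (1 : Int))) (PySem.List.pyRange 0 nq 1)).foldl pvScanStep acc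
    = acc ++ (PySem.List.pyRange 0 nq 1).map (fun i => pvLast acc + i + 1) := by
  rw [pvScan_const_block, pvRangeA_inc]

theorem pvScan_block_zero (nq : Int) (acc : List Int) :
    (List.map (fun _ => (("add" : String), (0 : Int))) (PySem.List.pyRange 0 nq 1)).foldl pvScanStep acc
    = acc ++ (PySem.List.pyRange 0 nq 1).map (fun _ => pvLast acc) := by
  rw [pvScan_const_block, pvRangeA_const]

theorem pvPairsN (nq : Int) (h : 0 ≤ nq) :
    ((PySem.List.pyRange 0 nq 1).flatMap
      (fun i => (PySem.List.pyRange (i + 1) nq 1).map (fun j => [i, j]))).length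
    = (PySem.List.pyRange 0 (PySem.Int.floordiv (nq * (nq - 1)) 2) 1).length := by
  rw [pvPairs_length (fun i j => [i, j]) nq.toNat 0 nq (by omega),
    PySem.List.length_pyRange_one, pvNumPairs nq h]
  omega

theorem pvCg_pairs {β : Type} (nq : Int) (c : β) (h : 0 ≤ nq) :
    (PySem.List.pyRange 0 nq 1).flatMap
      (fun i => (PySem.List.pyRange (i + 1) nq 1).map (fun _ => c))
    = (PySem.List.pyRange 0 (PySem.Int.floordiv (nq * (nq - 1)) 2) 1).map (fun _ => c) := by
  rw [pvFlatConst _ _ (fun i j => [i, j]) c, List.map_const', List.map_const', pvPairsN nq h]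

theorem pvScan_block_pairs (nq : Int) (acc : List Int) (h : 0 ≤ nq) :
    ((PySem.List.pyRange 0 nq 1).flatMap
      (fun i => (PySem.List.pyRange (i + 1) nq 1).map (fun _ => (("add" : String), (1 : Int))))).foldl
        pvScanStep acc
    = acc ++ (PySem.List.pyRange 0 (PySem.Int.floordiv (nq * (nq - 1)) 2) 1).map
        (fun i => pvLast acc + i + 1) := by
  rw [pvCg_pairs nq (("add" : String), (1 : Int)) h, pvScan_const_block, pvRangeA_inc]

theorem pvScan_block_pairs0 (nq : Int) (acc : List Int) (h : 0 ≤ nq) :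
    ((PySem.List.pyRange 0 nq 1).flatMap
      (fun i => (PySem.List.pyRange (i + 1) nq 1).map (fun _ => (("add" : String), (0 : Int))))).foldl
        pvScanStep acc
    = acc ++ (PySem.List.pyRange 0 (PySem.Int.floordiv (nq * (nq - 1)) 2) 1).map
        (fun _ => pvLast acc) := by
  rw [pvCg_pairs nq (("add" : String), (0 : Int)) h, pvScan_const_block, pvRangeA_const]

theorem pvLayer_couple_iqp (nq k : Int)
    (r : List (String × List Int × (String × Int) × (String × Int)))
    (h : 0 ≤ nq) :
    pvInterp (r ++ pvLayerRecords nq "iqp" k) = pvLayerDictA "iqp" nq k (pvInterp r) := by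
  simp only [pvLayerRecords, pvLayerDictA, String.reduceEq, reduceIte, get_iqp_embedding_layer,
    pvInterp, List.map_append, List.map_map, List.map_flatMap, pvScan_append, List.foldl_append]
  simp only [Function.comp_def]
  rw [pvScan_block_zero, pvScan_block_zero, pvScan_block_inc, pvScan_block_zero,
    pvScan_block_pairs nq _ h, pvScan_block_pairs0 nq _ h, pvCg_pairs nq "rzz" h]
  simp [List.append_assoc]

theorem pvLayer_couple (nq k : Int) (kind : String)
    (r : List (String × List Int × (String × Int) × (String × Int)))
    (h : kind = "iqp" → 0 ≤ nq) :
    pvInterp (r ++ pvLayerRecords nq kind k) = pvLayerDictA kind nq k (pvInterp r) := by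
  by_cases h1 : kind = "angle"
  · subst h1
    simp only [pvLayerRecords, pvLayerDictA, String.reduceEq, reduceIte,
      get_angle_embedding_layer, pvInterp, List.map_append, List.map_map, pvScan_append]
    simp only [Function.comp_def]
    rw [pvScan_block_inc, pvScan_block_zero]
  by_cases h2 : kind = "iqp"
  · subst h2; exact pvLayer_couple_iqp nq k r (h rfl)
  by_cases h3 : kind = "basic"
  · subst h3
    simp only [pvLayerRecords, pvLayerDictA, String.reduceEq, reduceIte,
      get_basic_var_layer, pvInterp, List.map_append, List.map_map, pvScan_append,
      List.foldl_append]
    simp only [Function.comp_def]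
    rw [pvScan_block_zero, pvScan_block_zero, pvScan_block_inc, pvScan_block_zero]
    simp [List.append_assoc]
  by_cases h4 : kind = "amp"
  · subst h4
    simp only [pvLayerRecords, pvLayerDictA, String.reduceEq, reduceIte,
      get_amp_encoding_layer, pvInterp, List.map_append, List.map_map, pvScan_append]
    simp [pvScanStep, pvScan]
  · simp [pvLayerRecords, pvLayerDictA, h1, h2, h3, h4, pvInterp]

theorem pvFold_couple (l : List Int) (nq : Int) (kind : String)
    (r : List (String × List Int × (String × Int) × (String × Int)))
    (h : kind = "iqp" → 0 ≤ nq) :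
    pvInterp (l.foldl (fun r i => r ++ pvLayerRecords nq kind i) r)
    = l.foldl (fun st i => pvLayerDictA kind nq i st) (pvInterp r) := by
  induction l generalizing r with
  | nil => rfl
  | cons a l ih => simp only [List.foldl_cons, ← pvLayer_couple nq a kind r h, ih]

-- ===== VERDICT (by name: the statement is the Claim_ definition above) =====
theorem pvFold_couple_range (nq : Int) (kind : String) (b : Int)
    (r : List (String × List Int × (String × Int) × (String × Int)))
    (h : kind = "iqp" → 0 < b → 0 ≤ nq) :
    pvInterp ((PySem.List.pyRange 0 b 1).foldl (fun r i => r ++ pvLayerRecords nq kind i) r)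
    = (PySem.List.pyRange 0 b 1).foldl (fun st i => pvLayerDictA kind nq i st) (pvInterp r) := by
  by_cases hb : 0 < b
  · exact pvFold_couple _ nq kind r (fun hk => h hk hb)
  · rw [PySem.List.pyRange_one_eq_nil (by omega)]; rfl

theorem convert_human_design_circ_to_gate_circ_spec : Claim_unchanged_convert_human_design_circ_to_gate_circ := by
  intro nq enc var ne nv _ hpre hnd
  have h1 : enc = "iqp" → 0 < ne → 0 ≤ nq := by
    intro he hne
    by_contra hqn
    exact hnd ⟨by omega, Or.inl ⟨hne, he⟩⟩
  have h2 : var = "iqp" → 0 < nv → 0 ≤ nq := by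
    intro he hne
    by_contra hqn
    exact hnd ⟨by omega, Or.inr ⟨hne, he⟩⟩
  show convert_human_design_circ_to_gate_circ nq enc var ne nv
      = convert_human_design_circ_to_gate_circ_alt nq enc var ne nv
  simp only [convert_human_design_circ_to_gate_circ]
  rw [show (([], [], [0], [0]) : List String × List (List Int) × List Int × List Int)
      = pvInterp [] from rfl,
    ← pvFold_couple_range nq enc ne [] h1, ← pvFold_couple_range nq var nv _ h2]
  rfl

theorem convert_human_design_circ_to_gate_circ_changed : Claim_changed_convert_human_design_circ_to_gate_circ := by
  unfold Claim_changed_convert_human_design_circ_to_gate_circ; decide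

theorem pvRecs_nil (nq : Int) (kind : String) (k : Int) (h : nq < 0) (hk : kind ≠ "amp") :
    pvLayerRecords nq kind k = [] := by
  simp only [pvLayerRecords]
  split_ifs <;>
    first
      | exact absurd ‹kind = "amp"› hk
      | simp [PySem.List.pyRange_one_eq_nil (show nq ≤ (0 : Int) by omega)]

theorem pvFoldRecs_nil (l : List Int) (nq : Int) (kind : String)
    (h : ∀ i, pvLayerRecords nq kind i = [])
    (r : List (String × List Int × (String × Int) × (String × Int))) :
    l.foldl (fun r i => r ++ pvLayerRecords nq kind i) r = r := by
  induction l generalizing r with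
  | nil => rfl
  | cons a l ih => simp [List.foldl_cons, h a, ih]

theorem pvCgA_mono (kind : String) (nq k : Int)
    (st : List String × List (List Int) × List Int × List Int) :
    st.1.length ≤ (pvLayerDictA kind nq k st).1.length := by
  obtain ⟨cg, gp, ib, wb⟩ := st
  simp only [pvLayerDictA, get_angle_embedding_layer, get_iqp_embedding_layer,
    get_basic_var_layer, get_amp_encoding_layer]
  split_ifs <;> simp [List.length_append] <;> omega

theorem pvCgA_iqp_grow (nq k : Int)
    (st : List String × List (List Int) × List Int × List Int) (h : nq < 0) :
    st.1.length + 1 ≤ (pvLayerDictA "iqp" nq k st).1.length := by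
  obtain ⟨cg, gp, ib, wb⟩ := st
  have hp : 1 ≤ PySem.Int.floordiv (nq * (nq - 1)) 2 := by
    rw [PySem.Int.le_floordiv_iff_mul_le (by norm_num)]
    nlinarith
  simp only [pvLayerDictA, get_iqp_embedding_layer, String.reduceEq, reduceIte]
  simp [PySem.List.pyRange_one_eq_nil (show nq ≤ 0 by omega), PySem.List.length_pyRange_one]
  have hp' : 1 ≤ nq * (nq - 1) / 2 := by
    rw [← PySem.Int.floordiv_eq_ediv_of_pos (by norm_num)]; exact hp
  omega

theorem pvCgA_fold_mono (l : List Int) (kind : String) (nq : Int)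
    (st : List String × List (List Int) × List Int × List Int) :
    st.1.length ≤ (l.foldl (fun st i => pvLayerDictA kind nq i st) st).1.length := by
  induction l generalizing st with
  | nil => exact le_refl _
  | cons a l ih =>
    simp only [List.foldl_cons]
    exact le_trans (pvCgA_mono kind nq a st) (ih _)

theorem pvCgA_fold_grow (l : List Int) (nq : Int) (hl : l ≠ []) (h : nq < 0)
    (st : List String × List (List Int) × List Int × List Int) :
    st.1.length + 1 ≤ (l.foldl (fun st i => pvLayerDictA "iqp" nq i st) st).1.length := by
  cases l with
  | nil => exact absurd rfl hl
  | cons a l =>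
    simp only [List.foldl_cons]
    exact le_trans (pvCgA_iqp_grow nq a st h) (pvCgA_fold_mono l "iqp" nq _)

theorem convert_human_design_circ_to_gate_circ_tight : Claim_exact_convert_human_design_circ_to_gate_circ := by
  intro nq enc var ne nv _ hpre hd heq
  obtain ⟨hq, hcase⟩ := hd
  obtain ⟨p1, p2, p3⟩ := hpre
  have hamp : ¬ ((0 < ne ∧ enc = "amp") ∨ (0 < nv ∧ var = "amp")) := by
    rcases p3 with h | h
    · omega
    · exact h
  have e1 : (PySem.List.pyRange 0 ne 1).foldl (fun r i => r ++ pvLayerRecords nq enc i)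
      ([] : List (String × List Int × (String × Int) × (String × Int))) = [] := by
    by_cases hne : 0 < ne
    · exact pvFoldRecs_nil _ nq enc
        (fun i => pvRecs_nil nq enc i hq (fun he => hamp (Or.inl ⟨hne, he⟩))) []
    · rw [PySem.List.pyRange_one_eq_nil (by omega)]; rfl
  have e2 : (PySem.List.pyRange 0 nv 1).foldl (fun r i => r ++ pvLayerRecords nq var i)
      ([] : List (String × List Int × (String × Int) × (String × Int))) = [] := by
    by_cases hnv : 0 < nv
    · exact pvFoldRecs_nil _ nq var
        (fun i => pvRecs_nil nq var i hq (fun he => hamp (Or.inr ⟨hnv, he⟩))) []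
    · rw [PySem.List.pyRange_one_eq_nil (by omega)]; rfl
  have hB : convert_human_design_circ_to_gate_circ_alt nq enc var ne nv = ([], [], [0], [0]) := by
    simp only [convert_human_design_circ_to_gate_circ_alt, e1, e2]
    rfl
  have hA : 1 ≤ (convert_human_design_circ_to_gate_circ nq enc var ne nv).1.length := by
    simp only [convert_human_design_circ_to_gate_circ]
    rcases hcase with ⟨hne, he⟩ | ⟨hnv, he⟩
    · subst he
      have g1 := pvCgA_fold_grow (PySem.List.pyRange 0 ne 1) nq
        (by rw [PySem.List.pyRange_one_cons (by omega)]; exact List.cons_ne_nil _ _) hq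
        ([], [], [0], [0])
      exact le_trans (by simpa using g1) (pvCgA_fold_mono _ var nq _)
    · subst he
      have g1 := pvCgA_fold_mono (PySem.List.pyRange 0 ne 1) enc nq
        (([], [], [0], [0]) : List String × List (List Int) × List Int × List Int)
      have g2 := pvCgA_fold_grow (PySem.List.pyRange 0 nv 1) nq
        (by rw [PySem.List.pyRange_one_cons (by omega)]; exact List.cons_ne_nil _ _) hq
        ((PySem.List.pyRange 0 ne 1).foldl (fun st i => pvLayerDictA enc nq i st)
          ([], [], [0], [0]))
      omega
  rw [heq, hB] at hA
  simp at hA
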